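-- pv_equiv track=rewrite | github.com/dmjz/osrs | helpers.py | concentricList
-- ===== SOURCE A (Python) =====
-- def addSides(posList, tlc, dims, n, m):
--     i = tlc[0]
--     j = tlc[1]
--     L = tlc[0]
--     R = tlc[0] + (dims[0]-1)
--     U = tlc[1]
--     D = tlc[1] + (dims[1]-1)
--     while i < R:
--         if -1 < i < n and -1 < j < m:
--             posList.append((i,j))
--         i += 1
--     while j < D:
--         if -1 < i < n and -1 < j < m:
--             posList.append((i,j))
--         j += 1
--     while i > L:
--         if -1 < i < n and -1 < j < m:
--             posList.append((i,j))
--         i -= 1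
--     while j > U:
--         if -1 < i < n and -1 < j < m:
--             posList.append((i,j))
--         j -= 1
--
-- def concentricList(n, m):
--     # Set up central rect ring
--     rectX = 0
--     rectY = 0
--     rectL = 0
--     rectH = 0
--     if n % 2 == 0:
--         rectX = n//2 - 1
--         rectL = 2
--     else:
--         rectX = (n-1)//2
--         rectL = 1
--     if m % 2 == 0:
--         rectY = m//2 - 1
--         rectH = 2
--     else:
--         rectY = (m-1)//2
--         rectH = 1
--
--     # Add central rect ring
--     posList = []
--     cent = ((rectX, rectY),
--             (rectX+1,rectY),
--             (rectX+1,rectY+1),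
--             (rectX,rectY+1))
--     posList.append(cent[0])
--     if n % 2 == 0:
--         posList.append(cent[1])
--         if m % 2 == 0:
--             posList.append(cent[2])
--             posList.append(cent[3])
--     elif m % 2 == 0:
--         posList.append(cent[3])
--
--     # Move outward adding the other rect rings
--     while rectX > -1 or rectY > -1:
--         rectX -= 1
--         rectY -= 1
--         rectL += 2
--         rectH += 2
--         addSides(posList, (rectX, rectY), (rectL, rectH), n, m)
--
--     return posList
-- ===== SOURCE B (Python) =====
-- def _clippedRing(x, y, R, D, n, m):
--     cells = []
--     if 0 <= y < m:                                   # top side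
--         cells += [(i, y) for i in range(max(x, 0), min(R, n))]
--     if 0 <= R < n:                                   # right side
--         cells += [(R, j) for j in range(max(y, 0), min(D, m))]
--     if 0 <= D < m:                                   # bottom side
--         cells += [(i, D) for i in range(min(R, n - 1), max(x, -1), -1)]
--     if 0 <= x < n:                                   # left side
--         cells += [(x, j) for j in range(min(D, m - 1), max(y, -1), -1)]
--     return cells
--
-- def concentricList(n, m):
--     if n % 2 == 0:
--         cx, w = n // 2 - 1, 2
--     else:
--         cx, w = (n - 1) // 2, 1
--     if m % 2 == 0:
--         cy, h = m // 2 - 1, 2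
--     else:
--         cy, h = (m - 1) // 2, 1
--     out = [(cx, cy)]
--     if n % 2 == 0:
--         out.append((cx + 1, cy))
--         if m % 2 == 0:
--             out.append((cx + 1, cy + 1))
--             out.append((cx, cy + 1))
--     elif m % 2 == 0:
--         out.append((cx, cy + 1))
--     for t in range(1, max(cx, cy) + 2):
--         x, y = cx - t, cy - t
--         R, D = x + w + 2 * t - 1, y + h + 2 * t - 1
--         out += _clippedRing(x, y, R, D, n, m)
--     return out
-- ===== Notes on version B (the rewrite author's own statement) =====
-- stated objective: alternative
-- what changed: Instead of walking every cell of each ring's full perimeter and bounds-testing each cell, B clips each ring's four sides to the grid rectangle arithmetically and emits only the in-bounds cells (measured ~1.4x on square grids; the saving grows with the grid's aspect ratio but was not >=1.5x on the timed square inputs).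
import Mathlib
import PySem

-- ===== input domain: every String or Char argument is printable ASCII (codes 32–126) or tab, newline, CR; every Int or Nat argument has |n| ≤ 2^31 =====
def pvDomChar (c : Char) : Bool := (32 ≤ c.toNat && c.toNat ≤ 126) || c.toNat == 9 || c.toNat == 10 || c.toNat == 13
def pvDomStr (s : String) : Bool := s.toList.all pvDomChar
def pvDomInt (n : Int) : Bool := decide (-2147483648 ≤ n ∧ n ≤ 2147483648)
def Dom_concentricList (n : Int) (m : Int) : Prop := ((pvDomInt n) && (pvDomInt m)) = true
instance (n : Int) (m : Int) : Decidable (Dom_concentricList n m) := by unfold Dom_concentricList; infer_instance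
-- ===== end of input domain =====

-- B replaces A's walk over every ring's full perimeter (bounds-testing each cell) by clipping
-- each ring's four sides to the grid rectangle and emitting only the in-bounds cells directly.

-- ===== PORT A =====
-- the four while-loops of addSides, each returning (updated posList, final loop variable)
def pvWhileTop (acc : List (Int × Int)) (i j R n m : Int) : List (Int × Int) × Int :=
  if i < R then
    pvWhileTop (if (-1 < i ∧ i < n) ∧ (-1 < j ∧ j < m) then acc ++ [(i, j)] else acc) (i + 1) j R n m
  else (acc, i)
termination_by (R - i).toNat
decreasing_by omega

def pvWhileRight (acc : List (Int × Int)) (i j D n m : Int) : List (Int × Int) × Int :=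
  if j < D then
    pvWhileRight (if (-1 < i ∧ i < n) ∧ (-1 < j ∧ j < m) then acc ++ [(i, j)] else acc) i (j + 1) D n m
  else (acc, j)
termination_by (D - j).toNat
decreasing_by omega

def pvWhileBottom (acc : List (Int × Int)) (i j L n m : Int) : List (Int × Int) × Int :=
  if i > L then
    pvWhileBottom (if (-1 < i ∧ i < n) ∧ (-1 < j ∧ j < m) then acc ++ [(i, j)] else acc) (i - 1) j L n m
  else (acc, i)
termination_by (i - L).toNat
decreasing_by omega

def pvWhileLeft (acc : List (Int × Int)) (i j U n m : Int) : List (Int × Int) × Int :=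
  if j > U then
    pvWhileLeft (if (-1 < i ∧ i < n) ∧ (-1 < j ∧ j < m) then acc ++ [(i, j)] else acc) i (j - 1) U n m
  else (acc, j)
termination_by (j - U).toNat
decreasing_by omega

def addSides (posList : List (Int × Int)) (tlc : Int × Int) (dims : Int × Int) (n m : Int) :
    List (Int × Int) :=
  let L := tlc.1
  let R := tlc.1 + (dims.1 - 1)
  let U := tlc.2
  let D := tlc.2 + (dims.2 - 1)
  let p1 := pvWhileTop posList tlc.1 tlc.2 R n m
  let p2 := pvWhileRight p1.1 p1.2 tlc.2 D n m
  let p3 := pvWhileBottom p2.1 p1.2 p2.2 L n m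
  let p4 := pvWhileLeft p3.1 p3.2 p2.2 U n m
  p4.1

-- the outer 'while rectX > -1 or rectY > -1' loop of concentricList
def pvRings (acc : List (Int × Int)) (rectX rectY rectL rectH n m : Int) : List (Int × Int) :=
  if rectX > -1 ∨ rectY > -1 then
    pvRings (addSides acc (rectX - 1, rectY - 1) (rectL + 2, rectH + 2) n m)
      (rectX - 1) (rectY - 1) (rectL + 2) (rectH + 2) n m
  else acc
termination_by (max rectX rectY + 1).toNat
decreasing_by omega

def concentricList (n : Int) (m : Int) : List (Int × Int) :=
  let rectX := if PySem.Int.mod n 2 = 0 then PySem.Int.floordiv n 2 - 1 else PySem.Int.floordiv (n - 1) 2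
  let rectL := if PySem.Int.mod n 2 = 0 then (2 : Int) else 1
  let rectY := if PySem.Int.mod m 2 = 0 then PySem.Int.floordiv m 2 - 1 else PySem.Int.floordiv (m - 1) 2
  let rectH := if PySem.Int.mod m 2 = 0 then (2 : Int) else 1
  let posList : List (Int × Int) :=
    [(rectX, rectY)] ++
      (if PySem.Int.mod n 2 = 0 then
        [(rectX + 1, rectY)] ++
          (if PySem.Int.mod m 2 = 0 then [(rectX + 1, rectY + 1), (rectX, rectY + 1)] else [])
      else if PySem.Int.mod m 2 = 0 then [(rectX, rectY + 1)] else [])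
  pvRings posList rectX rectY rectL rectH n m

-- ===== PORT B =====
def clippedRing (x y R D n m : Int) : List (Int × Int) :=
  (if 0 ≤ y ∧ y < m then (PySem.List.pyRange (max x 0) (min R n) 1).map (fun i => (i, y)) else []) ++
  (if 0 ≤ R ∧ R < n then (PySem.List.pyRange (max y 0) (min D m) 1).map (fun j => (R, j)) else []) ++
  (if 0 ≤ D ∧ D < m then (PySem.List.pyRange (min R (n - 1)) (max x (-1)) (-1)).map (fun i => (i, D)) else []) ++
  (if 0 ≤ x ∧ x < n then (PySem.List.pyRange (min D (m - 1)) (max y (-1)) (-1)).map (fun j => (x, j)) else [])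

def concentricList_alt (n : Int) (m : Int) : List (Int × Int) :=
  let cx := if PySem.Int.mod n 2 = 0 then PySem.Int.floordiv n 2 - 1 else PySem.Int.floordiv (n - 1) 2
  let w : Int := if PySem.Int.mod n 2 = 0 then 2 else 1
  let cy := if PySem.Int.mod m 2 = 0 then PySem.Int.floordiv m 2 - 1 else PySem.Int.floordiv (m - 1) 2
  let h : Int := if PySem.Int.mod m 2 = 0 then 2 else 1
  let out : List (Int × Int) :=
    [(cx, cy)] ++
      (if PySem.Int.mod n 2 = 0 then
        [(cx + 1, cy)] ++
          (if PySem.Int.mod m 2 = 0 then [(cx + 1, cy + 1), (cx, cy + 1)] else [])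
      else if PySem.Int.mod m 2 = 0 then [(cx, cy + 1)] else [])
  (PySem.List.pyRange 1 (max cx cy + 2) 1).foldl
    (fun acc t =>
      let x := cx - t
      let y := cy - t
      let R := x + w + 2 * t - 1
      let D := y + h + 2 * t - 1
      acc ++ clippedRing x y R D n m) out

-- ===== PRECONDITION & SPEC =====
def Spec_concentricList (n : Int) (m : Int) (out : List (Int × Int)) : Prop := out = concentricList_alt n m
instance (n : Int) (m : Int) (out : List (Int × Int)) : Decidable (Spec_concentricList n m out) := by unfold Spec_concentricList; infer_instance

-- ===== CLAIM (what is proved, stated in full; the proofs are below) =====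
def Claim_equal_concentricList : Prop := ∀ (n : Int) (m : Int), Dom_concentricList n m → Spec_concentricList n m (concentricList n m)

-- ===== LEMMAS AND PROOFS =====

-- one step of an ascending bounds-filtered scan equals one step of the clipped range
theorem rangeStepUp (i b n : Int) (h : i < b) :
    PySem.List.pyRange (max i 0) (min b n) 1 =
      (if 0 ≤ i ∧ i < n then [i] else []) ++ PySem.List.pyRange (max (i+1) 0) (min b n) 1 := by
  by_cases hi : 0 ≤ i ∧ i < n
  · obtain ⟨h1, h2⟩ := hi
    rw [if_pos ⟨h1, h2⟩, max_eq_left h1, max_eq_left (by omega : (0:Int) ≤ i + 1)]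
    rw [PySem.List.pyRange_one_cons (by omega : i < min b n)]
    simp
  · rw [if_neg hi]
    rcases lt_or_ge i 0 with hneg | hge
    · rw [show max i 0 = max (i+1) 0 by omega]
      simp
    · rw [PySem.List.pyRange_one_eq_nil (by omega), PySem.List.pyRange_one_eq_nil (by omega)]
      simp

-- one step of a descending bounds-filtered scan equals one step of the clipped countdown range
theorem rangeStepDown (i b n : Int) (h : b < i) :
    PySem.List.pyRange (min i (n-1)) (max b (-1)) (-1) =
      (if 0 ≤ i ∧ i < n then [i] else []) ++ PySem.List.pyRange (min (i-1) (n-1)) (max b (-1)) (-1) := by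
  by_cases hi : 0 ≤ i ∧ i < n
  · obtain ⟨h1, h2⟩ := hi
    rw [if_pos ⟨h1, h2⟩, min_eq_left (by omega : i ≤ n - 1), min_eq_left (by omega : i - 1 ≤ n - 1)]
    rw [PySem.List.pyRange_neg_one_cons (by omega : max b (-1) < i)]
    simp
  · rw [if_neg hi]
    rcases lt_or_ge i 0 with hneg | hge
    · rw [PySem.List.pyRange_neg_one_eq_nil (by omega), PySem.List.pyRange_neg_one_eq_nil (by omega)]
      simp
    · rw [show min i (n-1) = min (i-1) (n-1) by omega]
      simp

theorem pvWhileTop_eq (n m : Int) : ∀ (k : Nat) (acc : List (Int × Int)) (i j R : Int),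
    (R - i).toNat = k →
    pvWhileTop acc i j R n m =
      (acc ++ (if 0 ≤ j ∧ j < m then (PySem.List.pyRange (max i 0) (min R n) 1).map (fun t => (t, j)) else []),
       max i R) := by
  intro k
  induction k with
  | zero =>
    intro acc i j R hk
    rw [pvWhileTop, if_neg (by omega)]
    rw [PySem.List.pyRange_one_eq_nil (by omega), max_eq_left (by omega : R ≤ i)]
    simp
  | succ k ih =>
    intro acc i j R hk
    rw [pvWhileTop, if_pos (by omega : i < R), ih _ _ _ _ (by omega)]
    rw [rangeStepUp i R n (by omega)]
    by_cases hj : 0 ≤ j ∧ j < m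
    · rw [if_pos hj]
      by_cases hi : 0 ≤ i ∧ i < n
      · rw [if_pos (by exact ⟨⟨by omega, hi.2⟩, ⟨by omega, hj.2⟩⟩), if_pos hi]
        simp [max_eq_right (by omega : i ≤ R)]
        omega
      · rw [if_neg (by rintro ⟨⟨a,b⟩,_⟩; exact hi ⟨by omega, b⟩), if_neg hi]
        simp [max_eq_right (by omega : i ≤ R)]
        omega
    · rw [if_neg hj, if_neg hj, if_neg (by rintro ⟨_,⟨a,b⟩⟩; exact hj ⟨by omega, b⟩)]
      simp [max_eq_right (by omega : i ≤ R)]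
      omega

theorem pvWhileRight_eq (n m : Int) : ∀ (k : Nat) (acc : List (Int × Int)) (i j D : Int),
    (D - j).toNat = k →
    pvWhileRight acc i j D n m =
      (acc ++ (if 0 ≤ i ∧ i < n then (PySem.List.pyRange (max j 0) (min D m) 1).map (fun t => (i, t)) else []),
       max j D) := by
  intro k
  induction k with
  | zero =>
    intro acc i j D hk
    rw [pvWhileRight, if_neg (by omega)]
    rw [PySem.List.pyRange_one_eq_nil (by omega), max_eq_left (by omega : D ≤ j)]
    simp
  | succ k ih =>
    intro acc i j D hk
    rw [pvWhileRight, if_pos (by omega : j < D), ih _ _ _ _ (by omega)]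
    rw [rangeStepUp j D m (by omega)]
    by_cases hi : 0 ≤ i ∧ i < n
    · rw [if_pos hi]
      by_cases hj : 0 ≤ j ∧ j < m
      · rw [if_pos (by exact ⟨⟨by omega, hi.2⟩, ⟨by omega, hj.2⟩⟩), if_pos hj]
        simp [max_eq_right (by omega : j ≤ D)]
        omega
      · rw [if_neg (by rintro ⟨_,⟨a,b⟩⟩; exact hj ⟨by omega, b⟩), if_neg hj]
        simp [max_eq_right (by omega : j ≤ D)]
        omega
    · rw [if_neg hi, if_neg hi, if_neg (by rintro ⟨⟨a,b⟩,_⟩; exact hi ⟨by omega, b⟩)]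
      simp [max_eq_right (by omega : j ≤ D)]
      omega

theorem pvWhileBottom_eq (n m : Int) : ∀ (k : Nat) (acc : List (Int × Int)) (i j L : Int),
    (i - L).toNat = k →
    pvWhileBottom acc i j L n m =
      (acc ++ (if 0 ≤ j ∧ j < m then (PySem.List.pyRange (min i (n-1)) (max L (-1)) (-1)).map (fun t => (t, j)) else []),
       min i L) := by
  intro k
  induction k with
  | zero =>
    intro acc i j L hk
    rw [pvWhileBottom, if_neg (by omega)]
    rw [PySem.List.pyRange_neg_one_eq_nil (by omega), min_eq_left (by omega : i ≤ L)]
    simp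
  | succ k ih =>
    intro acc i j L hk
    rw [pvWhileBottom, if_pos (by omega : i > L), ih _ _ _ _ (by omega)]
    rw [rangeStepDown i L n (by omega)]
    by_cases hj : 0 ≤ j ∧ j < m
    · rw [if_pos hj]
      by_cases hi : 0 ≤ i ∧ i < n
      · rw [if_pos (by exact ⟨⟨by omega, hi.2⟩, ⟨by omega, hj.2⟩⟩), if_pos hi]
        simp [min_eq_right (by omega : L ≤ i)]
        omega
      · rw [if_neg (by rintro ⟨⟨a,b⟩,_⟩; exact hi ⟨by omega, b⟩), if_neg hi]
        simp [min_eq_right (by omega : L ≤ i)]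
        omega
    · rw [if_neg hj, if_neg hj, if_neg (by rintro ⟨_,⟨a,b⟩⟩; exact hj ⟨by omega, b⟩)]
      simp [min_eq_right (by omega : L ≤ i)]
      omega

theorem pvWhileLeft_eq (n m : Int) : ∀ (k : Nat) (acc : List (Int × Int)) (i j U : Int),
    (j - U).toNat = k →
    pvWhileLeft acc i j U n m =
      (acc ++ (if 0 ≤ i ∧ i < n then (PySem.List.pyRange (min j (m-1)) (max U (-1)) (-1)).map (fun t => (i, t)) else []),
       min j U) := by
  intro k
  induction k with
  | zero =>
    intro acc i j U hk
    rw [pvWhileLeft, if_neg (by omega)]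
    rw [PySem.List.pyRange_neg_one_eq_nil (by omega), min_eq_left (by omega : j ≤ U)]
    simp
  | succ k ih =>
    intro acc i j U hk
    rw [pvWhileLeft, if_pos (by omega : j > U), ih _ _ _ _ (by omega)]
    rw [rangeStepDown j U m (by omega)]
    by_cases hi : 0 ≤ i ∧ i < n
    · rw [if_pos hi]
      by_cases hj : 0 ≤ j ∧ j < m
      · rw [if_pos (by exact ⟨⟨by omega, hi.2⟩, ⟨by omega, hj.2⟩⟩), if_pos hj]
        simp [min_eq_right (by omega : U ≤ j)]
        omega
      · rw [if_neg (by rintro ⟨_,⟨a,b⟩⟩; exact hj ⟨by omega, b⟩), if_neg hj]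
        simp [min_eq_right (by omega : U ≤ j)]
        omega
    · rw [if_neg hi, if_neg hi, if_neg (by rintro ⟨⟨a,b⟩,_⟩; exact hi ⟨by omega, b⟩)]
      simp [min_eq_right (by omega : U ≤ j)]
      omega

theorem addSides_eq (acc : List (Int × Int)) (x y L H n m : Int) (hL : x < x + (L - 1)) (hH : y < y + (H - 1)) :
    addSides acc (x, y) (L, H) n m = acc ++ clippedRing x y (x + (L - 1)) (y + (H - 1)) n m := by
  simp only [addSides]
  rw [pvWhileTop_eq n m _ acc x y (x + (L - 1)) rfl]
  simp only []
  rw [max_eq_right (le_of_lt hL)]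
  rw [pvWhileRight_eq n m _ _ (x + (L - 1)) y (y + (H - 1)) rfl]
  simp only []
  rw [max_eq_right (le_of_lt hH)]
  rw [pvWhileBottom_eq n m _ _ (x + (L - 1)) (y + (H - 1)) x rfl]
  simp only []
  rw [min_eq_right (le_of_lt hL)]
  rw [pvWhileLeft_eq n m _ _ x (y + (H - 1)) y rfl]
  simp only [clippedRing, List.append_assoc]

theorem pvRings_eq (n m : Int) : ∀ (k : Nat) (acc : List (Int × Int)) (x y L H : Int),
    (max x y + 1).toNat = k → 1 ≤ L → 1 ≤ H →
    pvRings acc x y L H n m =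
      (PySem.List.pyRange 1 (max x y + 2) 1).foldl
        (fun a t => a ++ clippedRing (x - t) (y - t) ((x - t) + (L + 2 * t) - 1) ((y - t) + (H + 2 * t) - 1) n m) acc := by
  intro k
  induction k with
  | zero =>
    intro acc x y L H hk hL hH
    rw [pvRings, if_neg (by omega), PySem.List.pyRange_one_eq_nil (by omega)]
    simp
  | succ k ih =>
    intro acc x y L H hk hL hH
    rw [pvRings, if_pos (by omega : x > -1 ∨ y > -1)]
    rw [addSides_eq _ _ _ _ _ _ _ (by omega) (by omega)]
    rw [ih _ _ _ _ _ (by omega) (by omega) (by omega)]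
    rw [PySem.List.pyRange_one_cons (by omega : (1:Int) < max x y + 2), List.foldl_cons]
    have hshift : PySem.List.pyRange (1+1) (max x y + 2) 1 =
        (PySem.List.pyRange 1 (max (x-1) (y-1) + 2) 1).map (fun t => t + 1) := by
      rw [PySem.List.pyRange_one, PySem.List.pyRange_one, List.map_map]
      rw [show (max x y + 2 - (1+1)).toNat = (max (x-1) (y-1) + 2 - 1).toNat by omega]
      apply List.map_congr_left
      intro a _
      simp
      omega
    rw [hshift, List.foldl_map]
    have harg : acc ++ clippedRing (x - 1) (y - 1) (x - 1 + (L + 2 - 1)) (y - 1 + (H + 2 - 1)) n m =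
        acc ++ clippedRing (x - 1) (y - 1) (x - 1 + (L + 2 * 1) - 1) (y - 1 + (H + 2 * 1) - 1) n m := by
      congr 1; ring_nf
    rw [harg]
    congr 1
    funext a t
    congr 1
    congr 1 <;> ring

-- ===== VERDICT (by name: the statement is the Claim_ definition above) =====
theorem concentricList_spec : Claim_equal_concentricList := by
  intro n m _
  unfold Spec_concentricList concentricList concentricList_alt
  simp only []
  split_ifs <;>
    (rw [pvRings_eq n m _ _ _ _ _ _ rfl (by omega) (by omega)]
     congr 1
     funext a t
     congr 1
     congr 1 <;> ring)
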